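-- pv_equiv track=rewrite | github.com/nonpeera/IEEExtreme | Non/Rec.py | max_rectangle_after_modification
-- ===== SOURCE A (Python) =====
-- def largest_rectangle_area(heights):
--     # Monotonic stack to find max rectangle area
--     stack = []
--     max_area = 0
--     heights.append(0)  # Append sentinel value
--     for i, h in enumerate(heights):
--         while stack and heights[stack[-1]] > h:
--             height = heights[stack.pop()]
--             width = i if not stack else i - stack[-1] - 1
--             max_area = max(max_area, height * width)
--         stack.append(i)
--     heights.pop()  # Remove sentinel
--     return max_area
--
-- def max_rectangle_after_modification(heights, X):
--     # Step 1: Calculate max area without any modification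
--     max_area = largest_rectangle_area(heights[:])
--
--     # Step 2: Try modifying each element to X and calculate max area
--     for i in range(len(heights)):
--         if heights[i] < X:
--             # Modify the height at index i to X temporarily
--             original_height = heights[i]
--             heights[i] = X
--
--             # Calculate area with this modified array
--             max_area = max(max_area, largest_rectangle_area(heights))
--
--             # Revert the height back
--             heights[i] = original_height
--
--     return max_area
-- ===== SOURCE B (Python) =====
-- def _area(hs):
--     # largest rectangle in histogram via per-index extents (no stack):
--     # L[p] = leftmost l with hs[t] > hs[p] for all t in [l, p)
--     # R[p] = rightmost r with hs[t] >= hs[p] for all t in (p, r]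
--     # computed with pointer jumps through already-known extents
--     n = len(hs)
--     L = [0] * n
--     for p in range(n):
--         v = hs[p]
--         l = p
--         while l > 0 and hs[l - 1] > v:
--             l = L[l - 1]
--         L[p] = l
--     R = [0] * n
--     for p in reversed(range(n)):
--         v = hs[p]
--         r = p
--         while r + 1 < n and hs[r + 1] >= v:
--             r = R[r + 1]
--         R[p] = r
--     best = 0
--     for p in range(n):
--         area = hs[p] * (R[p] - L[p] + 1)
--         if area > best:
--             best = area
--     return best
--
-- def max_rectangle_after_modification(heights, X):
--     best = _area(heights)
--     n = len(heights)
--     for i in range(n):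
--         if heights[i] < X:
--             modified = heights[:i] + [X] + heights[i + 1:]
--             b = _area(modified)
--             if b > best:
--                 best = b
--     return best
-- ===== Notes on version B (the rewrite author's own statement) =====
-- stated objective: alternative
-- what changed: Replaces the monotonic index stack (sentinel append, pops, widths from stack neighbours) by two pointer-jump extent arrays L/R (nearest strictly-smaller-on-the-left / smaller-on-the-right frontiers) and a plain max over per-index candidates hs[p]*(R[p]-L[p]+1); the outer loop rebuilds each modified list instead of mutating and reverting.
import Mathlib
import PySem

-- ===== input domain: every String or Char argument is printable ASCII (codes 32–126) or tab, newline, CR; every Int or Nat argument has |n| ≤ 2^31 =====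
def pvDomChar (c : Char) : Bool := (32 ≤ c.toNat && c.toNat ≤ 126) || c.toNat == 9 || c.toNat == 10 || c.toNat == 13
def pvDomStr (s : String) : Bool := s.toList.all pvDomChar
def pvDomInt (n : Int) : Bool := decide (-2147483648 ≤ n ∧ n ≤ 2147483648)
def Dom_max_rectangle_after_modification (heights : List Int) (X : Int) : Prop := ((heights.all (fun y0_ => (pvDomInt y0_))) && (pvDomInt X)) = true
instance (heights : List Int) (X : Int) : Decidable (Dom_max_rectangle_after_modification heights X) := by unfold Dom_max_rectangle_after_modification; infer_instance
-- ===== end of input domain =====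

-- B replaces A's monotonic index stack by pointer-jump extent arrays and a plain
-- per-index maximum (alternative algorithm, same asymptotic cost); return values agree
-- on all inputs (A's in-place mutations are all reverted before it returns).

-- ===== PORT A =====
-- inner while loop of largest_rectangle_area: pops the stack (head = top)
def lraInner (hs : List Int) (i : Nat) (h : Int) : List Nat → Int → List Nat × Int
  | [], acc => ([], acc)
  | j :: rest, acc =>
    if hs.getD j 0 > h then
      lraInner hs i h rest (max acc (hs.getD j 0 * (match rest with
        | [] => (i : Int)
        | k :: _ => (i : Int) - (k : Int) - 1)))
    else (j :: rest, acc)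

-- for i, h in enumerate(heights): run the while loop, then push i
def lraOuter (hs : List Int) : List Int → Nat → List Nat × Int → List Nat × Int
  | [], _, st => st
  | h :: t, i, st =>
      lraOuter hs t (i + 1)
        ((i :: (lraInner hs i h st.1 st.2).1), (lraInner hs i h st.1 st.2).2)

-- heights.append(0); loop; heights.pop(): the loop runs over heights ++ [0]
def largest_rectangle_area (heights : List Int) : Int :=
  (lraOuter (heights ++ [0]) (heights ++ [0]) 0 ([], 0)).2

def max_rectangle_after_modification (heights : List Int) (X : Int) : Int :=
  (List.range heights.length).foldl
    (fun acc i =>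
      if heights.getD i 0 < X then
        max acc (largest_rectangle_area (heights.set i X))
      else acc)
    (largest_rectangle_area heights)

-- ===== PORT B =====
-- while l > 0 and hs[l-1] > v: l = L[l-1].  The fuel argument and the 'min (l-1)' are
-- termination guards only: l strictly decreases each iteration (for the extent values B
-- stores in L, L[l-1] ≤ l-1), so starting fuel = l never runs out before the loop stops
def jumpLF (hs : List Int) (L : List Nat) (v : Int) : Nat → Nat → Nat
  | 0, l => l
  | fuel + 1, l =>
    if 0 < l ∧ hs.getD (l - 1) 0 > v then
      jumpLF hs L v fuel (min (l - 1) (L.getD (l - 1) 0))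
    else l

def jumpL (hs : List Int) (L : List Nat) (v : Int) (l : Nat) : Nat :=
  jumpLF hs L v l l

-- while r + 1 < n and hs[r+1] >= v: r = R[r+1].  Fuel is a termination guard only:
-- r strictly increases and the loop stops at n, so fuel = n - r never runs out first
def jumpRF (hs : List Int) (R : List Nat) (v : Int) : Nat → Nat → Nat
  | 0, r => r
  | fuel + 1, r =>
    if r + 1 < hs.length ∧ hs.getD (r + 1) 0 ≥ v then
      jumpRF hs R v fuel (max (r + 1) (R.getD (r + 1) 0))
    else r

def jumpR (hs : List Int) (R : List Nat) (v : Int) (r : Nat) : Nat :=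
  jumpRF hs R v (hs.length - r) r

def bArea (hs : List Int) : Int :=
  let n := hs.length
  let L := (List.range n).foldl
    (fun (L : List Nat) p => L.set p (jumpL hs L (hs.getD p 0) p)) (List.replicate n 0)
  let R := ((List.range n).reverse).foldl
    (fun (R : List Nat) p => R.set p (jumpR hs R (hs.getD p 0) p)) (List.replicate n 0)
  (List.range n).foldl
    (fun best p =>
      if hs.getD p 0 * ((R.getD p 0 : Int) - (L.getD p 0 : Int) + 1) > best then
        hs.getD p 0 * ((R.getD p 0 : Int) - (L.getD p 0 : Int) + 1)
      else best) 0

def max_rectangle_after_modification_alt (heights : List Int) (X : Int) : Int :=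
  (List.range heights.length).foldl
    (fun best i =>
      if heights.getD i 0 < X then
        if bArea (heights.take i ++ [X] ++ heights.drop (i + 1)) > best then
          bArea (heights.take i ++ [X] ++ heights.drop (i + 1))
        else best
      else best)
    (bArea heights)

-- ===== PRECONDITION & SPEC =====
def Spec_max_rectangle_after_modification (heights : List Int) (X : Int) (out : Int) : Prop := out = max_rectangle_after_modification_alt heights X
instance (heights : List Int) (X : Int) (out : Int) : Decidable (Spec_max_rectangle_after_modification heights X out) := by unfold Spec_max_rectangle_after_modification; infer_instance

-- ===== CLAIM (what is proved, stated in full; the proofs are below) =====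
def Claim_equal_max_rectangle_after_modification : Prop := ∀ (heights : List Int) (X : Int), Dom_max_rectangle_after_modification heights X → Spec_max_rectangle_after_modification heights X (max_rectangle_after_modification heights X)

-- ===== LEMMAS AND PROOFS =====

-- specification-side extents: lextS hs v p = least l with hs[t] > v for all t ∈ [l, p)
def lextS (hs : List Int) (v : Int) : Nat → Nat
  | 0 => 0
  | l + 1 => if hs.getD l 0 > v then lextS hs v l else l + 1

-- rextS hs v r = greatest r' ≥ r with hs[t] ≥ v for all t ∈ (r, r'] (bounded by length);
-- fuel-driven: hs.length - r strictly decreases, so fuel hs.length - r is always enough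
def rextF (hs : List Int) (v : Int) : Nat → Nat → Nat
  | 0, r => r
  | fuel + 1, r =>
    if r + 1 < hs.length ∧ hs.getD (r + 1) 0 ≥ v then rextF hs v fuel (r + 1) else r

def rextS (hs : List Int) (v : Int) (r : Nat) : Nat := rextF hs v (hs.length - r) r

def lext (hs : List Int) (p : Nat) : Nat := lextS hs (hs.getD p 0) p
def rext (hs : List Int) (p : Nat) : Nat := rextS hs (hs.getD p 0) p

-- candidate area of the maximal rectangle whose minimal bar is (first reached at) p
def cand (hs : List Int) (p : Nat) : Int :=
  hs.getD p 0 * ((rext hs p : Int) - (lext hs p : Int) + 1)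

-- the common characterisation both programs are proved to satisfy
abbrev HistMax (hs : List Int) (r : Int) : Prop :=
  (∀ p, p < hs.length → cand hs p ≤ r) ∧ (r = 0 ∨ ∃ p, p < hs.length ∧ r = cand hs p) ∧ 0 ≤ r

lemma histMax_unique {hs : List Int} {r1 r2 : Int} (h1 : HistMax hs r1) (h2 : HistMax hs r2) : r1 = r2 := by
  obtain ⟨b1, a1, n1⟩ := h1
  obtain ⟨b2, a2, n2⟩ := h2
  have le12 : r1 ≤ r2 := by
    rcases a1 with h | ⟨p, hp, he⟩
    · omega
    · exact he ▸ b2 p hp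
  have le21 : r2 ≤ r1 := by
    rcases a2 with h | ⟨p, hp, he⟩
    · omega
    · exact he ▸ b1 p hp
  omega

-- ---- lext lemmas ----
lemma lextS_le (hs : List Int) (v : Int) (p : Nat) : lextS hs v p ≤ p := by
  induction p with
  | zero => simp [lextS]
  | succ l ih =>
    simp only [lextS]
    split
    · exact le_trans ih (by omega)
    · exact le_refl _

lemma lextS_gt (hs : List Int) (v : Int) (p : Nat) :
    ∀ t, lextS hs v p ≤ t → t < p → v < hs.getD t 0 := by
  induction p with
  | zero => intro t h1 h2; exact absurd h2 (by omega)
  | succ l ih =>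
    intro t h1 h2
    simp only [lextS] at h1
    by_cases hc : hs.getD l 0 > v
    · rw [if_pos hc] at h1
      by_cases ht : t = l
      · subst ht; exact hc
      · exact ih t h1 (by omega)
    · rw [if_neg hc] at h1
      exact absurd h2 (by omega)

lemma lextS_unique (hs : List Int) (v : Int) : ∀ (p l0 : Nat), l0 ≤ p →
    (∀ t, l0 ≤ t → t < p → v < hs.getD t 0) →
    (l0 = 0 ∨ hs.getD (l0 - 1) 0 ≤ v) → lextS hs v p = l0 := by
  intro p
  induction p with
  | zero =>
    intro l0 h1 _ _
    have h0 : l0 = 0 := by omega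
    subst h0; rfl
  | succ l ih =>
    intro l0 hle hgt hstop
    simp only [lextS]
    by_cases hc : hs.getD l 0 > v
    · rw [if_pos hc]
      have hlt : l0 ≤ l := by
        rcases Nat.eq_or_lt_of_le hle with heq | hlt
        · exfalso
          rcases hstop with h0 | hle2
          · omega
          · have hl : l0 - 1 = l := by omega
            rw [hl] at hle2; omega
        · omega
      exact ih l0 hlt (fun t h1 h2 => hgt t h1 (by omega)) hstop
    · rw [if_neg hc]
      have : l0 = l + 1 := by
        by_contra hne
        exact hc (hgt l (by omega) (by omega))
      omega

-- ---- rext lemmas ----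
lemma rextF_ge (hs : List Int) (v : Int) : ∀ (fuel r : Nat), r ≤ rextF hs v fuel r := by
  intro fuel
  induction fuel with
  | zero => intro r; exact le_refl r
  | succ fuel ih =>
    intro r
    simp only [rextF]
    split
    · exact le_trans (Nat.le_succ r) (ih (r + 1))
    · exact le_refl r

lemma rextS_ge (hs : List Int) (v : Int) (r : Nat) : r ≤ rextS hs v r := rextF_ge hs v _ r

lemma rextF_lt (hs : List Int) (v : Int) : ∀ (fuel r : Nat), r < hs.length →
    rextF hs v fuel r < hs.length := by
  intro fuel
  induction fuel with
  | zero => intro r hr; exact hr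
  | succ fuel ih =>
    intro r hr
    simp only [rextF]
    split
    · next hcond => exact ih (r + 1) hcond.1
    · exact hr

lemma rextS_lt (hs : List Int) (v : Int) (r : Nat) (hr : r < hs.length) :
    rextS hs v r < hs.length := rextF_lt hs v _ r hr

lemma rextF_mem (hs : List Int) (v : Int) : ∀ (fuel r : Nat),
    ∀ t, r < t → t ≤ rextF hs v fuel r → v ≤ hs.getD t 0 := by
  intro fuel
  induction fuel with
  | zero => intro r t h1 h2; simp only [rextF] at h2; exact absurd h2 (by omega)
  | succ fuel ih =>
    intro r t h1 h2
    simp only [rextF] at h2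
    split at h2
    · next hcond =>
      by_cases ht : t = r + 1
      · subst ht; exact hcond.2
      · exact ih (r + 1) t (by omega) h2
    · exact absurd h2 (by omega)

lemma rextS_mem (hs : List Int) (v : Int) (r : Nat) :
    ∀ t, r < t → t ≤ rextS hs v r → v ≤ hs.getD t 0 := rextF_mem hs v _ r

lemma rextF_unique (hs : List Int) (v : Int) : ∀ (fuel r r0 : Nat), hs.length - r ≤ fuel →
    r ≤ r0 → r0 < hs.length →
    (∀ t, r < t → t ≤ r0 → v ≤ hs.getD t 0) →
    (hs.length ≤ r0 + 1 ∨ hs.getD (r0 + 1) 0 < v) → rextF hs v fuel r = r0 := by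
  intro fuel
  induction fuel with
  | zero =>
    intro r r0 hk hge hr0 _ _
    exact absurd hr0 (by omega)
  | succ fuel ih =>
    intro r r0 hk hge hr0 hmem hstop
    simp only [rextF]
    split
    · next hcond =>
      by_cases hrr : r = r0
      · exfalso
        subst hrr
        rcases hstop with h | h
        · omega
        · exact absurd hcond.2 (not_le.mpr h)
      · exact ih (r + 1) r0 (by omega) (by omega) hr0
          (fun t h1 h2 => hmem t (by omega) h2) hstop
    · next hcond =>
      by_contra hne
      have h1 : r + 1 ≤ r0 := by omega
      exact hcond ⟨by omega, hmem (r + 1) (by omega) h1⟩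

lemma rextS_unique (hs : List Int) (v : Int) : ∀ (r r0 : Nat), r ≤ r0 → r0 < hs.length →
    (∀ t, r < t → t ≤ r0 → v ≤ hs.getD t 0) →
    (hs.length ≤ r0 + 1 ∨ hs.getD (r0 + 1) 0 < v) → rextS hs v r = r0 := by
  intro r r0 hge hr0 hmem hstop
  exact rextF_unique hs v _ r r0 (le_refl _) hge hr0 hmem hstop

lemma lext_le (hs : List Int) (p : Nat) : lext hs p ≤ p := lextS_le _ _ _
lemma rext_ge (hs : List Int) (p : Nat) : p ≤ rext hs p := rextS_ge _ _ _

lemma cand_nonpos (hs : List Int) (p : Nat) (h : hs.getD p 0 ≤ 0) : cand hs p ≤ 0 := by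
  have h1 := lext_le hs p
  have h2 := rext_ge hs p
  have hw : (0 : Int) ≤ (rext hs p : Int) - (lext hs p : Int) + 1 := by
    have : (lext hs p : Int) ≤ (rext hs p : Int) := by exact_mod_cast le_trans h1 h2
    omega
  exact mul_nonpos_of_nonpos_of_nonneg h hw

-- ---- sentinel bridge: (hs ++ [0]).getD t 0 = hs.getD t 0 for every t ----
lemma getD_append_zero (hs : List Int) (t : Nat) : (hs ++ [0]).getD t 0 = hs.getD t 0 := by
  by_cases h : t < hs.length
  · exact List.getD_append hs [0] 0 t h
  · have h' : hs.length ≤ t := not_lt.mp h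
    rw [List.getD_append_right hs [0] 0 t h', List.getD_eq_default hs 0 h']
    cases hsub : t - hs.length with
    | zero => rfl
    | succ k => rfl

lemma lraInner_append_zero (hs : List Int) (i : Nat) (h : Int) :
    ∀ (s : List Nat) (acc : Int), lraInner (hs ++ [0]) i h s acc = lraInner hs i h s acc := by
  intro s
  induction s with
  | nil => intro acc; rfl
  | cons j rest ih =>
    intro acc
    simp only [lraInner, getD_append_zero]
    split
    · exact ih _
    · rfl

-- ---- A's stack invariant ----
-- stack strictly decreasing (head = top), bar heights non-increasing downward, and between
-- consecutive stack indices every bar is strictly higher than the upper stack bar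
def SOk (hs : List Int) : List Nat → Prop
  | [] => True
  | [j] => ∀ t, t < j → hs.getD j 0 < hs.getD t 0
  | j :: k :: rest => k < j ∧ hs.getD k 0 ≤ hs.getD j 0 ∧
      (∀ t, k < t → t < j → hs.getD j 0 < hs.getD t 0) ∧ SOk hs (k :: rest)

-- stack members have not met a strictly smaller bar yet
abbrev Unf (hs : List Int) (i : Nat) (s : List Nat) : Prop :=
  ∀ j ∈ s, ∀ t, j < t → t < i → hs.getD j 0 ≤ hs.getD t 0

abbrev InvC (hs : List Int) (i : Nat) (s : List Nat) (acc : Int) : Prop :=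
  SOk hs s ∧ Unf hs i s ∧ (∀ j ∈ s, j < i) ∧
  (∀ p, p < i → p < hs.length → p ∉ s → cand hs p ≤ acc) ∧
  (acc = 0 ∨ ∃ p, p < i ∧ p < hs.length ∧ p ∉ s ∧ acc = cand hs p) ∧
  0 ≤ acc

abbrev TopH (i : Nat) (s : List Nat) : Prop := (i = 0 ∧ s = []) ∨ ∃ r, s = (i - 1) :: r

lemma SOk_head_lt (hs : List Int) : ∀ (rest : List Nat) (j : Nat), SOk hs (j :: rest) →
    ∀ m ∈ rest, m < j := by
  intro rest
  induction rest with
  | nil => intro j _ m hm; exact absurd hm (List.not_mem_nil)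
  | cons k rest' ih =>
    intro j h m hm
    rcases List.mem_cons.mp hm with rfl | hm'
    · exact h.1
    · exact lt_trans (ih k h.2.2.2 m hm') h.1

lemma SOk_head_le (hs : List Int) : ∀ (rest : List Nat) (j : Nat), SOk hs (j :: rest) →
    ∀ m ∈ rest, hs.getD m 0 ≤ hs.getD j 0 := by
  intro rest
  induction rest with
  | nil => intro j _ m hm; exact absurd hm (List.not_mem_nil)
  | cons k rest' ih =>
    intro j h m hm
    rcases List.mem_cons.mp hm with rfl | hm'
    · exact h.2.1
    · exact le_trans (ih k h.2.2.2 m hm') h.2.1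

lemma SOk_tail (hs : List Int) (j : Nat) (rest : List Nat) (h : SOk hs (j :: rest)) :
    SOk hs rest := by
  cases rest with
  | nil => trivial
  | cons k rest' => exact h.2.2.2

lemma SOk_cover (hs : List Int) : ∀ (rest : List Nat) (j : Nat), SOk hs (j :: rest) →
    ∀ t, t < j → t ∉ (j :: rest) → ∃ m ∈ j :: rest, t < m ∧ hs.getD m 0 < hs.getD t 0 := by
  intro rest
  induction rest with
  | nil =>
    intro j h t ht _
    exact ⟨j, List.mem_cons_self, ht, h t ht⟩
  | cons k rest' ih =>
    intro j h t ht htn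
    rcases lt_trichotomy t k with h1 | h1 | h1
    · have htn' : t ∉ k :: rest' := fun hm => htn (List.mem_cons_of_mem _ hm)
      obtain ⟨m, hm, h2, h3⟩ := ih k h.2.2.2 t h1 htn'
      exact ⟨m, List.mem_cons_of_mem _ hm, h2, h3⟩
    · exact absurd (by rw [h1]; exact List.mem_cons_of_mem _ List.mem_cons_self) htn
    · exact ⟨j, List.mem_cons_self, ht, h.2.2.1 t h1 ht⟩

lemma SOk_lext_pair (hs : List Int) (j k : Nat) (rest : List Nat)
    (h : SOk hs (j :: k :: rest)) : lext hs j = k + 1 := by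
  apply lextS_unique hs _ j (k + 1) (by have := h.1; omega)
  · intro t h1 h2; exact h.2.2.1 t (by omega) h2
  · right; simpa using h.2.1

lemma SOk_lext_single (hs : List Int) (j : Nat) (h : SOk hs [j]) : lext hs j = 0 :=
  lextS_unique hs _ j 0 (by omega) (fun t _ h2 => h t h2) (Or.inl rfl)

-- ---- the inner while loop preserves the invariant; pops exactly the bars taller than hs[i] ----
lemma lraInner_spec (hs : List Int) (i : Nat) (hin : i ≤ hs.length) :
    ∀ (s : List Nat) (acc : Int), InvC hs i s acc →
    InvC hs i (lraInner hs i (hs.getD i 0) s acc).1 (lraInner hs i (hs.getD i 0) s acc).2 ∧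
    (∀ m ∈ (lraInner hs i (hs.getD i 0) s acc).1, m ∈ s) ∧
    (∀ m ∈ s, m ∉ (lraInner hs i (hs.getD i 0) s acc).1 → hs.getD i 0 < hs.getD m 0) ∧
    (∀ m r', (lraInner hs i (hs.getD i 0) s acc).1 = m :: r' → hs.getD m 0 ≤ hs.getD i 0) := by
  intro s
  induction s with
  | nil =>
    intro acc hInv
    exact ⟨hInv, fun m hm => hm, fun m hm _ => absurd hm (List.not_mem_nil),
      fun m r' he => absurd he (by simp [lraInner])⟩
  | cons j rest ih =>
    intro acc hInv
    have hS := hInv.1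
    have hU := hInv.2.1
    have hB := hInv.2.2.1
    have hji : j < i := hB j List.mem_cons_self
    have hjn : j < hs.length := lt_of_lt_of_le hji hin
    by_cases hc : hs.getD j 0 > hs.getD i 0
    · -- pop j
      have hrext : rext hs j = i - 1 := by
        apply rextS_unique hs _ j (i - 1) (by omega) (by omega)
        · intro t h1 h2
          exact hU j List.mem_cons_self t h1 (by omega)
        · have he : i - 1 + 1 = i := by omega
          rw [he]; exact Or.inr hc
      have hcast : ((i - 1 : Nat) : Int) = (i : Int) - 1 := by
        rw [Nat.cast_sub (by omega : 1 ≤ i)]; norm_num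
      have hjrest : j ∉ rest := fun hm => absurd (SOk_head_lt hs rest j hS j hm) (lt_irrefl j)
      have hInv' : InvC hs i rest (max acc (cand hs j)) := by
        obtain ⟨hS, hU, hB, hbnd, hatt, hnn⟩ := hInv
        refine ⟨SOk_tail hs j rest hS,
          fun m hm t h1 h2 => hU m (List.mem_cons_of_mem _ hm) t h1 h2,
          fun m hm => hB m (List.mem_cons_of_mem _ hm), ?_, ?_,
          le_trans hnn (le_max_left _ _)⟩
        · intro p hp1 hp2 hp3
          by_cases hpj : p = j
          · subst hpj; exact le_max_right _ _
          · have hnc : p ∉ j :: rest := by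
              intro hm
              rcases List.mem_cons.mp hm with h | h
              · exact hpj h
              · exact hp3 h
            exact le_trans (hbnd p hp1 hp2 hnc) (le_max_left _ _)
        · rcases le_total (cand hs j) acc with hmx | hmx
          · rw [max_eq_left hmx]
            rcases hatt with h0 | ⟨p, hp1, hp2, hp3, hp4⟩
            · exact Or.inl h0
            · exact Or.inr ⟨p, hp1, hp2, fun hm => hp3 (List.mem_cons_of_mem _ hm), hp4⟩
          · rw [max_eq_right hmx]
            exact Or.inr ⟨j, hji, hjn, hjrest, rfl⟩
      cases rest with
      | nil =>
        have hl : lext hs j = 0 := SOk_lext_single hs j hS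
        have hw : hs.getD j 0 * (i : Int) = cand hs j := by
          unfold cand
          rw [hrext, hl, hcast]
          push_cast
          ring
        simp only [lraInner]
        rw [if_pos hc, hw]
        obtain ⟨ihInv, ihSub, ihPop, ihHead⟩ := ih (max acc (cand hs j)) hInv'
        refine ⟨ihInv, fun m hm => List.mem_cons_of_mem _ (ihSub m hm), ?_, ihHead⟩
        intro m hm hnm
        rcases List.mem_cons.mp hm with rfl | hm'
        · exact hc
        · exact ihPop m hm' hnm
      | cons k rest' =>
        have hl : lext hs j = k + 1 := SOk_lext_pair hs j k rest' hS
        have hw : hs.getD j 0 * ((i : Int) - (k : Int) - 1) = cand hs j := by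
          unfold cand
          rw [hrext, hl, hcast]
          push_cast
          ring
        simp only [lraInner]
        rw [if_pos hc, hw]
        obtain ⟨ihInv, ihSub, ihPop, ihHead⟩ := ih (max acc (cand hs j)) hInv'
        refine ⟨ihInv, fun m hm => List.mem_cons_of_mem _ (ihSub m hm), ?_, ihHead⟩
        intro m hm hnm
        rcases List.mem_cons.mp hm with rfl | hm'
        · exact hc
        · exact ihPop m hm' hnm
    · -- stop: stack top not taller than current bar
      simp only [lraInner]
      rw [if_neg hc]
      refine ⟨hInv, fun m hm => hm, fun m hm hnm => absurd hm hnm, ?_⟩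
      intro m r' he
      have he' : j :: rest = m :: r' := he
      injection he' with h1 _
      subst h1
      exact not_lt.mp hc

-- ---- one full step of the outer loop ----
lemma step_spec (hs : List Int) (i : Nat) (s : List Nat) (acc : Int)
    (hin : i ≤ hs.length) (hInv : InvC hs i s acc) (hTop : TopH i s) :
    InvC hs (i + 1) (i :: (lraInner hs i (hs.getD i 0) s acc).1)
      (lraInner hs i (hs.getD i 0) s acc).2 ∧
    TopH (i + 1) (i :: (lraInner hs i (hs.getD i 0) s acc).1) := by
  obtain ⟨rInv, rSub, rPop, rHead⟩ := lraInner_spec hs i hin s acc hInv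
  obtain ⟨hS, hU, hB, hbnd, hatt, hnn⟩ := hInv
  obtain ⟨rS, rU, rB, rbnd, ratt, rnn⟩ := rInv
  set res := lraInner hs i (hs.getD i 0) s acc with hresdef
  refine ⟨⟨?_, ?_, ?_, ?_, ?_, rnn⟩, Or.inr ⟨res.1, by simp⟩⟩
  · -- SOk (i :: res.1)
    cases hres1 : res.1 with
    | nil =>
      show SOk hs [i]
      intro t ht
      by_cases hts : t ∈ s
      · exact rPop t hts (by rw [hres1]; exact List.not_mem_nil)
      · rcases hTop with ⟨hi0, _⟩ | ⟨r0, hseq⟩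
        · exact absurd ht (by omega)
        · subst hseq
          have ht2 : t < i - 1 := by
            have : t ≠ i - 1 := fun h => hts (by rw [h]; exact List.mem_cons_self)
            omega
          obtain ⟨m, hm, _, hlt⟩ := SOk_cover hs r0 (i - 1) hS t ht2 hts
          have hpm := rPop m hm (by rw [hres1]; exact List.not_mem_nil)
          omega
    | cons j rest' =>
      have hSr : SOk hs (j :: rest') := by rw [← hres1]; exact rS
      have hjs : j ∈ s := rSub j (by rw [hres1]; exact List.mem_cons_self)
      refine ⟨hB j hjs, rHead j rest' hres1, ?_, hSr⟩
      intro t h1 h2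
      by_cases hts : t ∈ s
      · have htr : t ∉ j :: rest' := by
          intro hm
          rcases List.mem_cons.mp hm with rfl | hm'
          · exact absurd h1 (lt_irrefl _)
          · exact absurd (SOk_head_lt hs rest' j hSr t hm') (by omega)
        exact rPop t hts (by rw [hres1]; exact htr)
      · rcases hTop with ⟨hi0, _⟩ | ⟨r0, hseq⟩
        · exact absurd h2 (by omega)
        · subst hseq
          have ht2 : t < i - 1 := by
            have : t ≠ i - 1 := fun h => hts (by rw [h]; exact List.mem_cons_self)
            omega
          obtain ⟨m, hm, htm, hlt⟩ := SOk_cover hs r0 (i - 1) hS t ht2 hts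
          have hmr : m ∉ j :: rest' := by
            intro hmm
            rcases List.mem_cons.mp hmm with rfl | hm'
            · exact absurd htm (by omega)
            · exact absurd (SOk_head_lt hs rest' j hSr m hm') (by omega)
          have hpm := rPop m hm (by rw [hres1]; exact hmr)
          omega
  · -- Unf (i+1) (i :: res.1)
    intro m hm t h1 h2
    rcases List.mem_cons.mp hm with rfl | hm'
    · exact absurd h2 (by omega)
    · by_cases hti : t = i
      · subst hti
        cases hres1 : res.1 with
        | nil => rw [hres1] at hm'; exact absurd hm' (List.not_mem_nil)
        | cons j rest' =>
          rcases List.mem_cons.mp (hres1 ▸ hm') with rfl | hm''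
          · exact rHead m rest' hres1
          · have h3 := SOk_head_le hs rest' j (by rw [← hres1]; exact rS) m hm''
            have h4 := rHead j rest' hres1
            omega
      · exact rU m hm' t h1 (by omega)
  · intro m hm
    rcases List.mem_cons.mp hm with rfl | hm'
    · omega
    · exact lt_trans (rB m hm') (by omega)
  · intro p h1 h2 h3
    have hpi : p ≠ i := fun h => h3 (by rw [h]; exact List.mem_cons_self)
    exact rbnd p (by omega) h2 (fun hm => h3 (List.mem_cons_of_mem _ hm))
  · rcases ratt with h0 | ⟨p, hp1, hp2, hp3, hp4⟩
    · exact Or.inl h0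
    · refine Or.inr ⟨p, by omega, hp2, ?_, hp4⟩
      intro hm
      rcases List.mem_cons.mp hm with rfl | hm'
      · exact absurd hp1 (lt_irrefl _)
      · exact hp3 hm'

lemma lraOuter_spec (hs0 : List Int) : ∀ (t : List Int) (i : Nat) (s : List Nat) (acc : Int),
    (hs0 ++ [0]).drop i = t → i ≤ hs0.length + 1 → InvC hs0 i s acc → TopH i s →
    InvC hs0 (hs0.length + 1) (lraOuter (hs0 ++ [0]) t i (s, acc)).1
      (lraOuter (hs0 ++ [0]) t i (s, acc)).2 ∧
    TopH (hs0.length + 1) (lraOuter (hs0 ++ [0]) t i (s, acc)).1 := by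
  intro t
  induction t with
  | nil =>
    intro i s acc hdrop hile hInv hTop
    have hlen : (hs0 ++ [0]).length ≤ i := List.drop_eq_nil_iff.mp hdrop
    have hieq : i = hs0.length + 1 := by
      simp [List.length_append] at hlen; omega
    subst hieq
    exact ⟨hInv, hTop⟩
  | cons h t' ih =>
    intro i s acc hdrop hile hInv hTop
    have hlen : i < (hs0 ++ [0]).length := by
      by_contra hh
      rw [List.drop_eq_nil_iff.mpr (not_lt.mp hh)] at hdrop
      exact absurd hdrop (by simp)
    have hin : i ≤ hs0.length := by
      simp [List.length_append] at hlen; omega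
    have hh : h = hs0.getD i 0 := by
      have h2 : ((hs0 ++ [0]).drop i)[0]? = some h := by rw [hdrop]; rfl
      rw [List.getElem?_drop] at h2
      have h3 : (hs0 ++ [0]).getD i 0 = h := by
        rw [List.getD_eq_getElem?_getD]
        simp only [Nat.add_zero] at h2
        rw [h2]; rfl
      rw [← h3, getD_append_zero]
    have hdrop' : (hs0 ++ [0]).drop (i + 1) = t' := by
      rw [← List.tail_drop, hdrop]
      rfl
    simp only [lraOuter]
    rw [lraInner_append_zero, hh]
    obtain ⟨sInv, sTop⟩ := step_spec hs0 i s acc hin hInv hTop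
    exact ih (i + 1) _ _ hdrop' (by omega) sInv sTop

lemma lra_histMax (hs : List Int) : HistMax hs (largest_rectangle_area hs) := by
  unfold largest_rectangle_area
  have hInv0 : InvC hs 0 [] 0 := by
    refine ⟨trivial, fun m hm => absurd hm (List.not_mem_nil),
      fun m hm => absurd hm (List.not_mem_nil),
      fun p hp => absurd hp (by omega), Or.inl rfl, le_refl 0⟩
  obtain ⟨fInv, fTop⟩ := lraOuter_spec hs (hs ++ [0]) 0 [] 0 rfl (by omega) hInv0 (Or.inl ⟨rfl, rfl⟩)
  obtain ⟨fS, fU, fB, fbnd, fatt, fnn⟩ := fInv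
  rcases fTop with ⟨h0, _⟩ | ⟨r0, hseq⟩
  · omega
  · have hseq' : (lraOuter (hs ++ [0]) (hs ++ [0]) 0 ([], 0)).1 = hs.length :: r0 := by
      simpa using hseq
    refine ⟨?_, ?_, fnn⟩
    · intro p hp
      by_cases hmem : p ∈ (lraOuter (hs ++ [0]) (hs ++ [0]) 0 ([], 0)).1
      · have hp0 : p ∈ r0 := by
          rcases List.mem_cons.mp (hseq' ▸ hmem) with rfl | hm
          · exact absurd hp (lt_irrefl _)
          · exact hm
        have hle : hs.getD p 0 ≤ hs.getD hs.length 0 :=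
          SOk_head_le hs r0 hs.length (by rw [← hseq']; exact fS) p hp0
        have h0 : hs.getD hs.length 0 = 0 := List.getD_eq_default _ _ (le_refl _)
        have := cand_nonpos hs p (by omega)
        omega
      · exact fbnd p (by omega) hp hmem
    · rcases fatt with h0 | ⟨p, _, hp2, _, hp4⟩
      · exact Or.inl h0
      · exact Or.inr ⟨p, hp2, hp4⟩

-- ---- B-side ----
lemma jumpLF_spec (hs : List Int) (L : List Nat) (p : Nat)
    (hL : ∀ q, q < p → L.getD q 0 = lext hs q) :
    ∀ (fuel l : Nat), l ≤ fuel → l ≤ p →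
    (∀ t, l ≤ t → t < p → hs.getD p 0 < hs.getD t 0) →
    jumpLF hs L (hs.getD p 0) fuel l = lext hs p := by
  intro fuel
  induction fuel with
  | zero =>
    intro l hlf hlp hinv
    have hl0 : l = 0 := by omega
    subst hl0
    exact (lextS_unique hs _ p 0 (by omega)
      (fun t h1 h2 => hinv t (by omega) h2) (Or.inl rfl)).symm
  | succ fuel ih =>
    intro l hlf hlp hinv
    simp only [jumpLF]
    split
    · next hcond =>
      obtain ⟨hl0, hgt⟩ := hcond
      have h1 : l - 1 < p := by omega
      have h2 : L.getD (l - 1) 0 = lext hs (l - 1) := hL _ h1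
      have h3 : lext hs (l - 1) ≤ l - 1 := lext_le hs (l - 1)
      have hmin : min (l - 1) (L.getD (l - 1) 0) = lext hs (l - 1) := by rw [h2]; omega
      rw [hmin]
      apply ih (lext hs (l - 1)) (by omega) (by omega)
      intro t h4 h5
      rcases Nat.lt_or_ge t (l - 1) with h6 | h6
      · exact lt_trans hgt (lextS_gt hs (hs.getD (l - 1) 0) (l - 1) t h4 h6)
      · rcases Nat.eq_or_lt_of_le h6 with heq | hlt
        · rw [← heq]; exact hgt
        · exact hinv t (by omega) h5
    · next hcond =>
      refine (lextS_unique hs _ p l hlp hinv ?_).symm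
      rcases not_and_or.mp hcond with h | h
      · exact Or.inl (by omega)
      · exact Or.inr (not_lt.mp h)

lemma jumpL_spec (hs : List Int) (L : List Nat) (p : Nat)
    (hL : ∀ q, q < p → L.getD q 0 = lext hs q) :
    ∀ l, l ≤ p → (∀ t, l ≤ t → t < p → hs.getD p 0 < hs.getD t 0) →
    jumpL hs L (hs.getD p 0) l = lext hs p := by
  intro l hlp hinv
  exact jumpLF_spec hs L p hL l l (le_refl l) hlp hinv

lemma jumpRF_spec (hs : List Int) (R : List Nat) (p : Nat)
    (hR : ∀ q, p < q → q < hs.length → R.getD q 0 = rext hs q) :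
    ∀ (fuel r : Nat), hs.length - r ≤ fuel → p ≤ r → r < hs.length →
    (∀ t, p < t → t ≤ r → hs.getD p 0 ≤ hs.getD t 0) →
    jumpRF hs R (hs.getD p 0) fuel r = rext hs p := by
  intro fuel
  induction fuel with
  | zero => intro r hk _ h2 _; exact absurd h2 (by omega)
  | succ fuel ih =>
    intro r hk hpr hrlen hinv
    simp only [jumpRF]
    split
    · next hcond =>
      obtain ⟨hc1, hc2⟩ := hcond
      have e1 : R.getD (r + 1) 0 = rext hs (r + 1) := hR (r + 1) (by omega) hc1
      have e2 : r + 1 ≤ rext hs (r + 1) := rext_ge hs (r + 1)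
      have e3 : rext hs (r + 1) < hs.length := rextS_lt hs _ (r + 1) hc1
      have hmax : max (r + 1) (R.getD (r + 1) 0) = rext hs (r + 1) := by rw [e1]; omega
      rw [hmax]
      apply ih (rext hs (r + 1)) (by omega) (by omega) e3
      intro t h5 h6
      by_cases h7 : t ≤ r
      · exact hinv t h5 h7
      · by_cases h8 : t = r + 1
        · subst h8; exact hc2
        · exact le_trans hc2 (rextS_mem hs (hs.getD (r + 1) 0) (r + 1) t (by omega) h6)
    · next hcond =>
      refine (rextS_unique hs _ p r hpr hrlen hinv ?_).symm
      rcases not_and_or.mp hcond with h | h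
      · exact Or.inl (by omega)
      · exact Or.inr (not_le.mp h)

lemma jumpR_spec (hs : List Int) (R : List Nat) (p : Nat)
    (hR : ∀ q, p < q → q < hs.length → R.getD q 0 = rext hs q) :
    ∀ r, p ≤ r → r < hs.length → (∀ t, p < t → t ≤ r → hs.getD p 0 ≤ hs.getD t 0) →
    jumpR hs R (hs.getD p 0) r = rext hs p := by
  intro r h1 h2 h3
  exact jumpRF_spec hs R p hR (hs.length - r) r (le_refl _) h1 h2 h3

lemma buildL_spec (hs : List Int) : ∀ (m : Nat), m ≤ hs.length →
    ((List.range m).foldl (fun (L : List Nat) p => L.set p (jumpL hs L (hs.getD p 0) p))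
        (List.replicate hs.length 0)).length = hs.length ∧
    ∀ q, q < m → ((List.range m).foldl (fun (L : List Nat) p => L.set p (jumpL hs L (hs.getD p 0) p))
        (List.replicate hs.length 0)).getD q 0 = lext hs q := by
  intro m
  induction m with
  | zero =>
    intro _
    refine ⟨by simp, fun q hq => absurd hq (by omega)⟩
  | succ m ih =>
    intro hm
    obtain ⟨ihlen, ihval⟩ := ih (by omega)
    rw [List.range_succ, List.foldl_append]
    simp only [List.foldl_cons, List.foldl_nil]
    set Lm := (List.range m).foldl (fun (L : List Nat) p => L.set p (jumpL hs L (hs.getD p 0) p))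
        (List.replicate hs.length 0) with hLm
    have hjump : jumpL hs Lm (hs.getD m 0) m = lext hs m :=
      jumpL_spec hs Lm m (fun q hq => ihval q hq) m (le_refl m)
        (fun t h1 h2 => absurd h1 (by omega))
    have hmlen : m < Lm.length := by rw [ihlen]; omega
    refine ⟨by rw [List.length_set]; exact ihlen, ?_⟩
    intro q hq
    by_cases hqm : q = m
    · subst hqm
      rw [List.getD_eq_getElem?_getD, List.getElem?_set_self hmlen, Option.getD_some, hjump]
    · rw [List.getD_eq_getElem?_getD, List.getElem?_set_ne (by omega : m ≠ q),
        ← List.getD_eq_getElem?_getD]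
      exact ihval q (by omega)

lemma buildR_spec (hs : List Int) : ∀ (m : Nat) (R0 : List Nat), m ≤ hs.length →
    R0.length = hs.length → (∀ q, m ≤ q → q < hs.length → R0.getD q 0 = rext hs q) →
    (((List.range m).reverse).foldl (fun (R : List Nat) p => R.set p (jumpR hs R (hs.getD p 0) p)) R0).length = hs.length ∧
    ∀ q, q < hs.length →
      (((List.range m).reverse).foldl (fun (R : List Nat) p => R.set p (jumpR hs R (hs.getD p 0) p)) R0).getD q 0 = rext hs q := by
  intro m
  induction m with
  | zero =>
    intro R0 _ hlen hval
    simp only [List.range_zero, List.reverse_nil, List.foldl_nil]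
    exact ⟨hlen, fun q hq => hval q (by omega) hq⟩
  | succ m ih =>
    intro R0 hm hlen hval
    rw [List.range_succ]
    simp only [List.reverse_append, List.reverse_cons, List.reverse_nil, List.nil_append,
      List.singleton_append, List.foldl_cons]
    have hmlen : m < R0.length := by rw [hlen]; omega
    have hjump : jumpR hs R0 (hs.getD m 0) m = rext hs m :=
      jumpR_spec hs R0 m (fun q h1 h2 => hval q (by omega) h2) m (le_refl m) (by omega)
        (fun t h1 h2 => absurd h1 (by omega))
    apply ih (R0.set m (jumpR hs R0 (hs.getD m 0) m)) (by omega)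
      (by rw [List.length_set]; exact hlen)
    intro q hq1 hq2
    by_cases hqm : q = m
    · subst hqm
      rw [List.getD_eq_getElem?_getD, List.getElem?_set_self hmlen, Option.getD_some, hjump]
    · rw [List.getD_eq_getElem?_getD, List.getElem?_set_ne (by omega : m ≠ q),
        ← List.getD_eq_getElem?_getD]
      exact hval q (by omega) hq2

lemma foldmax_bounds (f : Nat → Int) (n : Nat) :
    (∀ p, p < n → f p ≤ (List.range n).foldl (fun b p => max b (f p)) 0) ∧
    ((List.range n).foldl (fun b p => max b (f p)) 0 = 0 ∨
      ∃ p, p < n ∧ (List.range n).foldl (fun b p => max b (f p)) 0 = f p) ∧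
    0 ≤ (List.range n).foldl (fun b p => max b (f p)) 0 := by
  induction n with
  | zero =>
    refine ⟨fun p hp => absurd hp (by omega), Or.inl (by simp), by simp⟩
  | succ n ih =>
    obtain ⟨ihb, iha, ihn⟩ := ih
    rw [List.range_succ, List.foldl_append]
    simp only [List.foldl_cons, List.foldl_nil]
    set F := (List.range n).foldl (fun b p => max b (f p)) 0 with hF
    refine ⟨?_, ?_, le_trans ihn (le_max_left _ _)⟩
    · intro p hp
      by_cases hpn : p = n
      · subst hpn; exact le_max_right _ _
      · exact le_trans (ihb p (by omega)) (le_max_left _ _)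
    · rcases le_total (f n) F with h | h
      · rw [max_eq_left h]
        rcases iha with h0 | ⟨p, hp, he⟩
        · exact Or.inl h0
        · exact Or.inr ⟨p, by omega, he⟩
      · rw [max_eq_right h]
        exact Or.inr ⟨n, by omega, rfl⟩

lemma if_gt_eq_max (a b : Int) : (if b > a then b else a) = max a b := by
  rw [max_def]; split_ifs <;> omega

lemma bArea_histMax (hs : List Int) : HistMax hs (bArea hs) := by
  unfold bArea
  obtain ⟨hLlen, hLval⟩ := buildL_spec hs hs.length (le_refl _)
  obtain ⟨hRlen, hRval⟩ := buildR_spec hs hs.length (List.replicate hs.length 0) (le_refl _)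
    (by simp) (fun q h1 h2 => absurd h1 (by omega))
  have hcongr := PySem.List.foldl_congr_mem
    (l := List.range hs.length)
    (init := (0 : Int))
    (f := fun best p =>
      if hs.getD p 0 *
      (((((List.range hs.length).reverse).foldl (fun (R : List Nat) p => R.set p (jumpR hs R (hs.getD p 0) p)) (List.replicate hs.length 0)).getD p 0 : Int) -
      ((((List.range hs.length).foldl (fun (L : List Nat) p => L.set p (jumpL hs L (hs.getD p 0) p)) (List.replicate hs.length 0)).getD p 0 : Int)) + 1) > best then
        hs.getD p 0 *
      (((((List.range hs.length).reverse).foldl (fun (R : List Nat) p => R.set p (jumpR hs R (hs.getD p 0) p)) (List.replicate hs.length 0)).getD p 0 : Int) -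
      ((((List.range hs.length).foldl (fun (L : List Nat) p => L.set p (jumpL hs L (hs.getD p 0) p)) (List.replicate hs.length 0)).getD p 0 : Int)) + 1)
      else best)
    (g := fun best p => max best (cand hs p))
    (fun acc x hx => by
      dsimp only
      rw [hRval x (List.mem_range.mp hx), hLval x (List.mem_range.mp hx), if_gt_eq_max]
      rfl)
  rw [hcongr]
  exact foldmax_bounds (cand hs) hs.length

lemma area_eq (hs : List Int) : largest_rectangle_area hs = bArea hs :=
  histMax_unique (lra_histMax hs) (bArea_histMax hs)

-- ===== VERDICT (by name: the statement is the Claim_ definition above) =====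
theorem max_rectangle_after_modification_spec : Claim_equal_max_rectangle_after_modification := by
  intro heights X _
  show max_rectangle_after_modification heights X = max_rectangle_after_modification_alt heights X
  unfold max_rectangle_after_modification max_rectangle_after_modification_alt
  rw [area_eq]
  apply PySem.List.foldl_congr_mem
  intro acc x hx
  have hxl : x < heights.length := List.mem_range.mp hx
  by_cases hc : heights.getD x 0 < X
  · rw [if_pos hc, if_pos hc, if_gt_eq_max, area_eq, List.set_eq_take_cons_drop X hxl,
      ← List.singleton_append, ← List.append_assoc]
  · rw [if_neg hc, if_neg hc]
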